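-- pv_equiv track=rewrite | github.com/thierryxdp/TCC | problems/807/solution_214762.py | cortaPalavra
-- ===== SOURCE A (Python) =====
-- def cortaPalavra(frase, palavra, posicaoInicial, posicaoFinal):
--     posicao = str.find(frase, palavra, posicaoInicial, posicaoFinal)
--     if (posicao != -1): # Recursao para contar as ocorrencias
--         return cortaPalavra(
--             str.replace(frase, palavra, "", 1),
--             palavra,
--             posicaoInicial,
--             posicaoFinal-len(palavra)
--         )
--     return frase
-- ===== SOURCE B (Python) =====
-- def _temOcorrencia(s, w, a, b):
--     # Python slice-style clamping of the window bounds, then a manual scan.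
--     n = len(s)
--     if a < 0:
--         a += n
--     if a < 0:
--         a = 0
--     if b < 0:
--         b += n
--     if b < 0:
--         b = 0
--     if b > n:
--         b = n
--     for i in range(a, b - len(w) + 1):
--         if s[i:i+len(w)] == w:
--             return True
--     return False
--
--
-- def _removePrimeira(s, w):
--     # splice out the leftmost occurrence found by a manual scan
--     for i in range(len(s) - len(w) + 1):
--         if s[i:i+len(w)] == w:
--             return s[:i] + s[i+len(w):]
--     return s
--
--
-- def cortaPalavra(frase, palavra, posicaoInicial, posicaoFinal):
--     while _temOcorrencia(frase, palavra, posicaoInicial, posicaoFinal):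
--         frase = _removePrimeira(frase, palavra)
--         posicaoFinal -= len(palavra)
--     return frase
-- ===== Notes on version B (the rewrite author's own statement) =====
-- stated objective: alternative
-- what changed: Replaces A's tail recursion over str.find/str.replace with a while-loop driven by two hand-written index scans: an occurrence test that clamps the window bounds itself and compares the slice s[i:i+len(w)] at each index, and a removal that splices at the first matching index; no str.find/str.replace at all.
import Mathlib
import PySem

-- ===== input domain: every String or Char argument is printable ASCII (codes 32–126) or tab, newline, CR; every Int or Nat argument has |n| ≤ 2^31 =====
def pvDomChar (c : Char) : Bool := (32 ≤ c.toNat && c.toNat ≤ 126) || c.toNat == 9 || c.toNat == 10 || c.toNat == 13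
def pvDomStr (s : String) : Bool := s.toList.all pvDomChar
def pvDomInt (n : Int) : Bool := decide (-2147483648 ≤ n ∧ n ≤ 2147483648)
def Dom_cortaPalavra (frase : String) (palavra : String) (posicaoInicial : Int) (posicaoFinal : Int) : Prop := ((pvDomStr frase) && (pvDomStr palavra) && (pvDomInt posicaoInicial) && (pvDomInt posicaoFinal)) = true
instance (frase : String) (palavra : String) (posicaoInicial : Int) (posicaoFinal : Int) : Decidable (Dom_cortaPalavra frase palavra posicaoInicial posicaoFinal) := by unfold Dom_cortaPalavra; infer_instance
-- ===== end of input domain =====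

-- B replaces A's tail recursion on str.find/str.replace by a while-loop driven by two
-- hand-written index scans (explicit slice-bound clamping, slice comparison at each index,
-- splice by slicing); a different decomposition of the same cost (objective: alternative).

-- ===== PORT A =====
-- hand port of Python's str.replace(s, w, "", 1) (PySem.Chars.replace has no count):
-- exact, since replace with count 1 removes exactly the characters [q, q+len w) at the
-- first occurrence q, and leaves s unchanged when w does not occur (for w = "" it
-- inserts "" before position 0, i.e. also leaves s unchanged, matching q = 0 here).
def pvReplace1 (s w : List Char) : List Char :=
  let q := PySem.Chars.find s w
  if q = -1 then s else s.take q.toNat ++ s.drop (q.toNat + w.length)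

-- A's recursion, with a fuel argument for Lean totality only: inside Pre_ every
-- recursive call shortens s by w.length ≥ 1, so fuel = s.length + 1 is never exhausted.
def cortaA : Nat → List Char → List Char → Int → Int → List Char
  | 0, s, _, _, _ => s
  | fuel + 1, s, w, a, b =>
    let posicao := PySem.Chars.findFrom s w a (some b)
    if posicao ≠ -1 then
      cortaA fuel (pvReplace1 s w) w a (b - (w.length : Int))
    else s

def cortaPalavra (frase : String) (palavra : String) (posicaoInicial : Int) (posicaoFinal : Int) : String :=
  String.ofList (cortaA (frase.toList.length + 1) frase.toList palavra.toList posicaoInicial posicaoFinal)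

-- ===== PORT B =====
-- Source B's _temOcorrencia: clamp the two bounds exactly as the Python code does;
-- the Python's sequential 'if' statements are written as nested ifs (each inner test is
-- the next statement's test on the value the previous statement left behind)
def pvClampA (n : Int) (a : Int) : Int :=
  if a < 0 then (if a + n < 0 then 0 else a + n) else a

def pvClampB (n : Int) (b : Int) : Int :=
  if b < 0 then
    (if b + n < 0 then (if (0 : Int) > n then n else 0) else (if b + n > n then n else b + n))
  else (if b > n then n else b)

-- … then scan i over range(a, b - len(w) + 1) comparing the slice s[i:i+len(w)] with w
def temScan (s w : List Char) (i stop : Int) : Bool :=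
  if i < stop then
    if PySem.List.slice s (some i) (some (i + (w.length : Int))) = w then true
    else temScan s w (i + 1) stop
  else false
termination_by (stop - i).toNat
decreasing_by omega

def temOcorrencia (s w : List Char) (a b : Int) : Bool :=
  let lo := pvClampA (s.length : Int) a
  let hi := pvClampB (s.length : Int) b
  temScan s w lo (hi - (w.length : Int) + 1)

-- Source B's _removePrimeira: scan i over range(len(s) - len(w) + 1); at the first slice
-- match return s[:i] + s[i+len(w):], after an exhausted loop return s
def removeScan (s w : List Char) (i stop : Int) : List Char :=
  if i < stop then
    if PySem.List.slice s (some i) (some (i + (w.length : Int))) = w then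
      PySem.List.slice s none (some i) ++ PySem.List.slice s (some (i + (w.length : Int))) none
    else removeScan s w (i + 1) stop
  else s
termination_by (stop - i).toNat
decreasing_by omega

def removePrimeira (s w : List Char) : List Char :=
  removeScan s w 0 ((s.length : Int) - (w.length : Int) + 1)

-- B's while-loop as recursion over the loop state (frase, posicaoFinal); same fuel remark as in A.
def cortaB : Nat → List Char → List Char → Int → Int → List Char
  | 0, s, _, _, _ => s
  | fuel + 1, s, w, a, b =>
    if temOcorrencia s w a b then
      cortaB fuel (removePrimeira s w) w a (b - (w.length : Int))
    else s

def cortaPalavra_alt (frase : String) (palavra : String) (posicaoInicial : Int) (posicaoFinal : Int) : String :=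
  String.ofList (cortaB (frase.toList.length + 1) frase.toList palavra.toList posicaoInicial posicaoFinal)

-- ===== PRECONDITION & SPEC =====
-- Pre_ excludes only the inputs where palavra = "" is found inside the window: there Python A
-- recurses on an unchanged state forever and dies with RecursionError (it never returns).
def Pre_cortaPalavra (frase : String) (palavra : String) (posicaoInicial : Int) (posicaoFinal : Int) : Prop :=
  palavra = "" → PySem.Str.findFrom frase palavra posicaoInicial (some posicaoFinal) = -1
instance (frase : String) (palavra : String) (posicaoInicial : Int) (posicaoFinal : Int) : Decidable (Pre_cortaPalavra frase palavra posicaoInicial posicaoFinal) := by unfold Pre_cortaPalavra; infer_instance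

def pvWitness_cortaPalavra : String × String × Int × Int := ("banana nab", "na", 0, 9)

def Spec_cortaPalavra (frase : String) (palavra : String) (posicaoInicial : Int) (posicaoFinal : Int) (out : String) : Prop := out = cortaPalavra_alt frase palavra posicaoInicial posicaoFinal
instance (frase : String) (palavra : String) (posicaoInicial : Int) (posicaoFinal : Int) (out : String) : Decidable (Spec_cortaPalavra frase palavra posicaoInicial posicaoFinal out) := by unfold Spec_cortaPalavra; infer_instance

-- ===== CLAIM (what is proved, stated in full; the proofs are below) =====
def Claim_equal_cortaPalavra : Prop := ∀ (frase : String) (palavra : String) (posicaoInicial : Int) (posicaoFinal : Int), Dom_cortaPalavra frase palavra posicaoInicial posicaoFinal → Pre_cortaPalavra frase palavra posicaoInicial posicaoFinal → Spec_cortaPalavra frase palavra posicaoInicial posicaoFinal (cortaPalavra frase palavra posicaoInicial posicaoFinal)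

-- ===== LEMMAS AND PROOFS =====

-- the slice s[i:i+len w] (0 ≤ i) equals w iff w is a prefix of s.drop i
theorem slice_match_iff (s w : List Char) (i : Int) (hi : 0 ≤ i) :
    PySem.List.slice s (some i) (some (i + (w.length : Int))) = w ↔ w <+: s.drop i.toNat := by
  rw [PySem.List.slice_toNat s hi (by omega)]
  have h : (i + (w.length : Int)).toNat - i.toNat = w.length := by omega
  rw [h]
  constructor
  · intro he; rw [List.prefix_iff_eq_take]; exact he.symm
  · intro hp; exact ((List.prefix_iff_eq_take).mp hp).symm

-- the scan over range(i, stop) finds a slice match iff some admissible index carries one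
theorem temScan_iff (s w : List Char) (i stop : Int) (hi : 0 ≤ i) :
    temScan s w i stop = true ↔ ∃ j : Int, i ≤ j ∧ j < stop ∧ w <+: s.drop j.toNat := by
  generalize hm : (stop - i).toNat = m
  induction m generalizing i with
  | zero =>
    rw [temScan, if_neg (by omega)]
    constructor
    · intro h; exact absurd h (by simp)
    · rintro ⟨j, h1, h2, -⟩; exfalso; omega
  | succ m ih =>
    rw [temScan, if_pos (by omega)]
    by_cases hmatch : PySem.List.slice s (some i) (some (i + (w.length : Int))) = w
    · rw [if_pos hmatch]
      simp only [true_iff]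
      exact ⟨i, le_refl _, by omega, (slice_match_iff s w i hi).mp hmatch⟩
    · rw [if_neg hmatch, ih (i + 1) (by omega) (by omega)]
      constructor
      · rintro ⟨j, h1, h2, h3⟩; exact ⟨j, by omega, h2, h3⟩
      · rintro ⟨j, h1, h2, h3⟩
        refine ⟨j, ?_, h2, h3⟩
        rcases eq_or_lt_of_le h1 with heq | hlt
        · exfalso; apply hmatch
          rw [slice_match_iff s w i hi, heq]; exact h3
        · omega

-- occurrence of a nonempty w inside the clamped window [lo, hi) of s, as an index condition
theorem infix_window_iff (s w : List Char) (lo hi : Int) (hlo : 0 ≤ lo) (hhi : 0 ≤ hi)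
    (hw : w ≠ []) :
    w <:+: (s.take hi.toNat).drop lo.toNat ↔
      ∃ j : Int, lo ≤ j ∧ j < hi - (w.length : Int) + 1 ∧ w <+: s.drop j.toNat := by
  constructor
  · intro hinf
    rcases List.infix_iff_prefix_suffix.mp hinf with ⟨t, hpre, hsuf⟩
    rw [List.suffix_iff_eq_drop] at hsuf
    set l := (s.take hi.toNat).drop lo.toNat with hl
    set k := l.length - t.length with hk
    have ht : t = l.drop k := hsuf
    rw [ht, hl, List.drop_drop, List.drop_take] at hpre
    rw [List.prefix_take_iff] at hpre
    obtain ⟨hp, hlen⟩ := hpre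
    have hwpos : 0 < w.length := List.length_pos_iff.mpr hw
    refine ⟨((lo.toNat + k : Nat) : Int), by omega, by omega, ?_⟩
    rw [Int.toNat_natCast]; exact hp
  · rintro ⟨j, h1, h2, h3⟩
    have hj0 : 0 ≤ j := le_trans hlo h1
    have hfit : w.length ≤ hi.toNat - j.toNat := by omega
    have hp : w <+: (s.drop j.toNat).take (hi.toNat - j.toNat) :=
      List.prefix_take_iff.mpr ⟨h3, hfit⟩
    rw [← List.drop_take] at hp
    have hsplit : (s.take hi.toNat).drop j.toNat
        = ((s.take hi.toNat).drop lo.toNat).drop (j.toNat - lo.toNat) := by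
      rw [List.drop_drop]; congr 1; omega
    rw [hsplit] at hp
    exact hp.isInfix.trans (List.drop_suffix _ _).isInfix

-- B's clamped end equals the one findFrom computes
theorem clampB_eq (n b : Int) (_hn : 0 ≤ n) :
    pvClampB n b = if n < b then n else if b < 0 then (if b + n < 0 then 0 else b + n) else b := by
  unfold pvClampB; split_ifs <;> omega

theorem clampA_nonneg (n a : Int) (_hn : 0 ≤ n) : 0 ≤ pvClampA n a := by
  unfold pvClampA; split_ifs <;> omega

theorem clampB_nonneg (n b : Int) (hn : 0 ≤ n) : 0 ≤ pvClampB n b := by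
  unfold pvClampB; split_ifs <;> omega

-- characterisation of findFrom ≠ -1 through the clamped window
theorem findFrom_ne_iff (s w : List Char) (a b : Int) :
    PySem.Chars.findFrom s w a (some b) ≠ -1 ↔
      pvClampA (s.length : Int) a ≤ pvClampB (s.length : Int) b ∧
        w <:+: List.drop (pvClampA (s.length : Int) a).toNat (List.take (pvClampB (s.length : Int) b).toNat s) := by
  have hrw : PySem.Chars.findFrom s w a (some b) =
      (if pvClampB (s.length : Int) b < pvClampA (s.length : Int) a then -1
       else if PySem.Chars.find (List.drop (pvClampA (s.length : Int) a).toNat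
                 (List.take (pvClampB (s.length : Int) b).toNat s)) w = -1 then -1
       else pvClampA (s.length : Int) a +
            PySem.Chars.find (List.drop (pvClampA (s.length : Int) a).toNat
              (List.take (pvClampB (s.length : Int) b).toNat s)) w) := by
    rw [clampB_eq _ _ (Int.natCast_nonneg _)]
    rfl
  rw [hrw]
  have hst0 : 0 ≤ pvClampA (s.length : Int) a := clampA_nonneg _ _ (Int.natCast_nonneg _)
  by_cases hord : pvClampB (s.length : Int) b < pvClampA (s.length : Int) a
  · rw [if_pos hord]
    simp only [ne_eq, not_true_eq_false, false_iff, not_and]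
    intro h; omega
  · rw [if_neg hord]
    constructor
    · intro hne
      by_cases h0 : PySem.Chars.find (List.drop (pvClampA (s.length : Int) a).toNat
          (List.take (pvClampB (s.length : Int) b).toNat s)) w = -1
      · rw [if_pos h0] at hne; exact absurd rfl hne
      · exact ⟨by omega, (PySem.Chars.find_ne_neg_one_iff _ _).mp h0⟩
    · rintro ⟨-, hinf⟩
      have hrne := (PySem.Chars.find_ne_neg_one_iff _ _).mpr hinf
      have hr0 := PySem.Chars.neg_one_le_find (List.drop (pvClampA (s.length : Int) a).toNat
        (List.take (pvClampB (s.length : Int) b).toNat s)) w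
      rw [if_neg hrne]
      omega

-- B's window test agrees with A's findFrom test
theorem tem_iff_findFrom (s w : List Char) (a b : Int) :
    temOcorrencia s w a b = true ↔ PySem.Chars.findFrom s w a (some b) ≠ -1 := by
  unfold temOcorrencia
  have hlo0 : 0 ≤ pvClampA (s.length : Int) a := clampA_nonneg _ _ (Int.natCast_nonneg _)
  have hhi0 : 0 ≤ pvClampB (s.length : Int) b := clampB_nonneg _ _ (Int.natCast_nonneg _)
  rw [temScan_iff s w _ _ hlo0, findFrom_ne_iff]
  by_cases hw : w = []
  · subst hw
    simp only [List.length_nil, Nat.cast_zero, List.nil_prefix, and_true, List.nil_infix]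
    constructor
    · rintro ⟨j, h1, h2⟩; omega
    · intro h; exact ⟨pvClampA (s.length : Int) a, le_refl _, by omega⟩
  · rw [infix_window_iff s w _ _ hlo0 hhi0 hw]
    constructor
    · rintro ⟨j, h1, h2, h3⟩
      have hwpos : 0 < w.length := List.length_pos_iff.mpr hw
      exact ⟨by omega, j, h1, h2, h3⟩
    · rintro ⟨-, hj⟩; exact hj

-- the removal scan returns s when no admissible index matches
theorem removeScan_no (s w : List Char) (i stop : Int) (hi : 0 ≤ i)
    (h : ∀ j : Int, i ≤ j → j < stop → ¬ w <+: s.drop j.toNat) :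
    removeScan s w i stop = s := by
  generalize hm : (stop - i).toNat = m
  induction m generalizing i with
  | zero => rw [removeScan, if_neg (by omega)]
  | succ m ih =>
    rw [removeScan, if_pos (by omega)]
    rw [if_neg (fun hmatch => h i (le_refl _) (by omega) ((slice_match_iff s w i hi).mp hmatch))]
    exact ih (i + 1) (by omega) (fun j h1 h2 => h j (by omega) h2) (by omega)

-- the removal scan splices at the first matching index q
theorem removeScan_hit (s w : List Char) (i stop q : Int) (hi : 0 ≤ i) (hiq : i ≤ q)
    (hqs : q < stop) (hq : w <+: s.drop q.toNat)
    (hmin : ∀ j : Int, 0 ≤ j → j < q → ¬ w <+: s.drop j.toNat) :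
    removeScan s w i stop = s.take q.toNat ++ s.drop (q.toNat + w.length) := by
  generalize hm : (q - i).toNat = m
  induction m generalizing i with
  | zero =>
    have hiq' : i = q := by omega
    subst hiq'
    rw [removeScan, if_pos (by omega), if_pos ((slice_match_iff s w i hi).mpr hq)]
    rw [PySem.List.slice_to s hi, PySem.List.slice_from s (by omega : (0:Int) ≤ i + (w.length : Int))]
    congr 2
    omega
  | succ m ih =>
    rw [removeScan, if_pos (by omega)]
    rw [if_neg (fun hmatch => hmin i hi (by omega) ((slice_match_iff s w i hi).mp hmatch))]
    exact ih (i + 1) (by omega) (by omega) (by omega)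

-- B's removal equals A's str.replace(s, w, "", 1)
theorem removePrimeira_eq (s w : List Char) : removePrimeira s w = pvReplace1 s w := by
  unfold removePrimeira pvReplace1
  by_cases hfind : PySem.Chars.find s w = -1
  · rw [if_pos hfind]
    have hninf : ¬ w <:+: s := (PySem.Chars.find_eq_neg_one_iff _ _).mp hfind
    exact removeScan_no s w 0 _ (le_refl _) (fun j _ _ hp =>
      hninf (hp.isInfix.trans (List.drop_suffix _ _).isInfix))
  · rw [if_neg hfind]
    set r := PySem.Chars.find s w with hr
    have hr0 : 0 ≤ r := by have := PySem.Chars.neg_one_le_find s w; rw [← hr] at this; omega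
    obtain ⟨hpre, hmin⟩ := PySem.Chars.find_spec (s := s) (sub := w) hr0
    have hlen : w.length ≤ s.length - r.toNat := by
      have := hpre.length_le; simpa using this
    have hrlen : r ≤ (s.length : Int) := PySem.Chars.find_le_length s w
    refine removeScan_hit s w 0 _ r (le_refl _) hr0 (by omega) hpre ?_
    intro j hj0 hjr
    exact hmin j.toNat (by omega)

-- the two drivers agree step by step
theorem cortaA_eq_cortaB (fuel : Nat) : ∀ (s w : List Char) (a b : Int),
    cortaA fuel s w a b = cortaB fuel s w a b := by
  induction fuel with
  | zero => intro s w a b; rfl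
  | succ n ih =>
    intro s w a b
    by_cases h : PySem.Chars.findFrom s w a (some b) = -1
    · have htem : temOcorrencia s w a b = false := by
        rw [← Bool.not_eq_true, tem_iff_findFrom]; simpa using h
      simp [cortaA, cortaB, h, htem]
    · have htem : temOcorrencia s w a b = true := (tem_iff_findFrom s w a b).mpr h
      simp only [cortaA, cortaB, h, htem, ne_eq, not_false_iff, if_true]
      rw [ih, removePrimeira_eq]

-- ===== VERDICT (by name: the statement is the Claim_ definition above) =====
theorem cortaPalavra_spec : Claim_equal_cortaPalavra := by
  intro frase palavra pi pf _ _
  unfold Spec_cortaPalavra cortaPalavra cortaPalavra_alt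
  rw [cortaA_eq_cortaB]
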